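-- pv_equiv track=rewrite | github.com/SahibKazimli/LaunchSafe | backend/agents/fix/fix_patch_helpers.py | _naive_paren_depth
-- ===== SOURCE A (Python) =====
-- def _naive_paren_depth(text: str) -> int:
--     depth = 0
--     for char in text:
--         if char == "(":
--             depth += 1
--         elif char == ")":
--             depth -= 1
--     return depth
-- ===== SOURCE B (Python) =====
-- def _naive_paren_depth(text: str) -> int:
--     return text.count("(") - text.count(")")
-- ===== Notes on version B (the rewrite author's own statement) =====
-- stated objective: faster
-- what changed: Replaces the single accumulating character loop with two independent str.count scans whose results are subtracted.
import Mathlib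
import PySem

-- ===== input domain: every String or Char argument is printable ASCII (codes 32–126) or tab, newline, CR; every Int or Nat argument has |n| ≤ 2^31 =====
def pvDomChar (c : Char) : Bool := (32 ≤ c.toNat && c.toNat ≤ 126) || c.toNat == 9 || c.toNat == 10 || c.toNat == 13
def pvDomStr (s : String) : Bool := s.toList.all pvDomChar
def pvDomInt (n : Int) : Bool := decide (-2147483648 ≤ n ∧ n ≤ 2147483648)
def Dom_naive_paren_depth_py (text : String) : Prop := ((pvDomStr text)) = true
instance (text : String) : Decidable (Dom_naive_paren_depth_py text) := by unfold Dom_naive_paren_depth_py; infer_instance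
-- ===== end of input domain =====

-- B replaces A's accumulating character loop with two str.count scans subtracted (constant-factor faster: C-level scans instead of a Python-level loop).


-- ===== PORT A =====
-- depth = 0; for char in text: if '(' then +1 elif ')' then -1; return depth
def naive_paren_depth_py (text : String) : Int :=
  text.toList.foldl
    (fun depth char =>
      if char == '(' then depth + 1
      else if char == ')' then depth - 1
      else depth) 0

-- ===== PORT B =====
-- return text.count("(") - text.count(")")
def naive_paren_depth_py_alt (text : String) : Int :=
  (PySem.Str.count text "(" : Int) - (PySem.Str.count text ")" : Int)

-- ===== PRECONDITION & SPEC =====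
def Spec_naive_paren_depth_py (text : String) (out : Int) : Prop := out = naive_paren_depth_py_alt text
instance (text : String) (out : Int) : Decidable (Spec_naive_paren_depth_py text out) := by unfold Spec_naive_paren_depth_py; infer_instance

-- ===== CLAIM (what is proved, stated in full; the proofs are below) =====
def Claim_equal_naive_paren_depth_py : Prop := ∀ (text : String), Dom_naive_paren_depth_py text → Spec_naive_paren_depth_py text (naive_paren_depth_py text)

-- ===== LEMMAS AND PROOFS =====

-- PySem.Chars.count.go with a one-character needle counts occurrences of that character
theorem pv_go_single (c : Char) (l : List Char) (fuel acc : Nat) (h : l.length ≤ fuel) :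
    PySem.Chars.count.go [c] fuel l acc = acc + l.count c := by
  induction l generalizing fuel acc with
  | nil => cases fuel <;> simp [PySem.Chars.count.go]
  | cons x t ih =>
    cases fuel with
    | zero => simp at h
    | succ f =>
      simp only [PySem.Chars.count.go]
      by_cases hx : c = x
      · subst hx
        simp [List.isPrefixOf]
        rw [ih _ _ (by simpa using h)]
        omega
      · simp [List.isPrefixOf, hx, Ne.symm hx]
        rw [ih _ _ (by simpa using h)]

-- str.count with a one-character needle is List.count on the characters
theorem pv_count_single (l : List Char) (c : Char) :
    PySem.Chars.count l [c] = l.count c := by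
  simp [PySem.Chars.count, pv_go_single c l l.length 0 le_rfl]

-- A's loop invariant: folding from acc adds (count '(') - (count ')')
theorem pv_foldl_depth (l : List Char) (acc : Int) :
    l.foldl
      (fun depth char =>
        if char == '(' then depth + 1
        else if char == ')' then depth - 1
        else depth) acc
      = acc + (l.count '(' : Int) - (l.count ')' : Int) := by
  induction l generalizing acc with
  | nil => simp
  | cons x t ih =>
    simp only [List.foldl_cons, ih, List.count_cons]
    by_cases h1 : x = '(' <;> by_cases h2 : x = ')' <;>
      simp_all <;> ring

-- ===== VERDICT (by name: the statement is the Claim_ definition above) =====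
theorem naive_paren_depth_py_spec : Claim_equal_naive_paren_depth_py := by
  intro text _
  unfold Spec_naive_paren_depth_py naive_paren_depth_py naive_paren_depth_py_alt
  rw [pv_foldl_depth]
  simp [PySem.Str.count, pv_count_single]
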